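-- pv_equiv track=rewrite | github.com/myafxd/4activity | horovod.py | round_dance
-- ===== SOURCE A (Python) =====
-- def round_dance(iterable):
--     # Находим минимальный элемент и его индекс
--     min_element = min(iterable)
--     min_index = iterable.index(min_element)
--
--     # Проверяем, соответствует ли порядок элементов правильному хороводу
--     n = len(iterable)
--     for i in range(n):
--         if iterable[(min_index + i) % n] != min_element + i:
--             return False
--     return True
-- ===== SOURCE B (Python) =====
-- def round_dance(iterable):
--     # Count the cyclic adjacent pairs that step up by exactly 1; a valid
--     # round dance has exactly n-1 such steps (the remaining pair is the wrap).
--     n = len(iterable)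
--     c = 0
--     for i in range(n):
--         if iterable[(i + 1) % n] - iterable[i] == 1:
--             c += 1
--     return c == n - 1
-- ===== Notes on version B (the rewrite author's own statement) =====
-- stated objective: alternative
-- what changed: Instead of locating the minimum with min()/index() and checking the rotated sequence against min, min+1, ..., B makes one cyclic pass counting adjacent pairs that step up by exactly 1 and returns True iff exactly n-1 of the n cyclic differences equal 1.
-- outside the precondition, e.g. on round_dance([]): A raises ValueError, B returns False
import Mathlib
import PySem

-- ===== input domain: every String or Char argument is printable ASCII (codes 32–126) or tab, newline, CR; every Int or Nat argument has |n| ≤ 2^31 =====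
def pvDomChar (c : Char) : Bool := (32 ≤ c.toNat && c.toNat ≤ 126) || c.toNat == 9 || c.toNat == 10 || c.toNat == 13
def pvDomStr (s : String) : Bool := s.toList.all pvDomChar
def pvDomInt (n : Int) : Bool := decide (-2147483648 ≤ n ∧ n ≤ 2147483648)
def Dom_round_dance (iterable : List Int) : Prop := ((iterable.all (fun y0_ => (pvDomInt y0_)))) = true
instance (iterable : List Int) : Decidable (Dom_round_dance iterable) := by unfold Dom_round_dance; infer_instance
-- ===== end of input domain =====

-- B drops A's min/index anchoring and instead counts, in one cyclic pass, the adjacent pairs that step up by exactly 1 (alternative decomposition, same cost).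


-- ===== PORT A =====
-- the for-loop with its early 'return False'
def round_dance_loop (l : List Int) (m mi n : Int) : List Int → Bool
  | [] => true
  | i :: rest =>
    -- the index (min_index + i) % n is always in range, so pyGetD with default 0 is exact here
    if PySem.List.pyGetD l (PySem.Int.mod (mi + i) n) 0 ≠ m + i then false
    else round_dance_loop l m mi n rest

def round_dance (iterable : List Int) : Bool :=
  match PySem.List.min? iterable (fun x => x) with
  | none => false            -- unreachable under Pre_: min([]) raises ValueError
  | some min_element =>
    match PySem.List.index? iterable min_element with
    | none => false          -- unreachable: the minimum is a member
    | some min_index =>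
      let n : Int := PySem.List.len iterable
      round_dance_loop iterable min_element (min_index : Int) n (PySem.List.pyRange 0 n 1)

-- ===== PORT B =====
def round_dance_alt (iterable : List Int) : Bool :=
  let n : Int := PySem.List.len iterable
  let c : Int := (PySem.List.pyRange 0 n 1).foldl
    (fun c i =>
      -- the index (i + 1) % n is always in range, so pyGetD with default 0 is exact here
      if PySem.List.pyGetD iterable (PySem.Int.mod (i + 1) n) 0
           - PySem.List.pyGetD iterable i 0 = 1
      then c + 1 else c) 0
  c == n - 1

-- ===== PRECONDITION & SPEC =====
-- Pre_ excludes only the empty list, on which Python A raises ValueError (from min([])).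
def Pre_round_dance (iterable : List Int) : Prop := iterable ≠ []
instance (iterable : List Int) : Decidable (Pre_round_dance iterable) := by unfold Pre_round_dance; infer_instance
def pvWitness_round_dance : List Int := [3, 1, 2]

def Spec_round_dance (iterable : List Int) (out : Bool) : Prop := out = round_dance_alt iterable
instance (iterable : List Int) (out : Bool) : Decidable (Spec_round_dance iterable out) := by unfold Spec_round_dance; infer_instance

-- ===== CLAIM (what is proved, stated in full; the proofs are below) =====
def Claim_equal_round_dance : Prop := ∀ (iterable : List Int), Dom_round_dance iterable → Pre_round_dance iterable → Spec_round_dance iterable (round_dance iterable)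

-- ===== LEMMAS AND PROOFS =====

-- value at a Nat index (default irrelevant: all uses are in range)
def pvF (l : List Int) (j : Nat) : Int := l.getD j 0
-- the cyclic forward difference at position j
def pvD (l : List Int) (j : Nat) : Int := pvF l ((j + 1) % l.length) - pvF l j

-- A's loop is an 'all' over its range
lemma loop_eq_all (l : List Int) (m mi n : Int) (is : List Int) :
    round_dance_loop l m mi n is =
      is.all (fun i => PySem.List.pyGetD l (PySem.Int.mod (mi + i) n) 0 == m + i) := by
  induction is with
  | nil => rfl
  | cons i rest ih =>
    by_cases h : PySem.List.pyGetD l (PySem.Int.mod (mi + i) n) 0 = m + i <;>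
      simp [round_dance_loop, h, ih]

-- A returns True iff the scan anchored at the first minimum matches m, m+1, …
lemma A_char (l : List Int) (m : Int) (mi : Nat)
    (hmin : PySem.List.min? l (fun x => x) = some m)
    (hidx : PySem.List.index? l m = some mi) :
    round_dance l = true ↔ ∀ k < l.length, pvF l ((mi + k) % l.length) = m + k := by
  simp only [round_dance, hmin, hidx, PySem.List.len, pvF]
  rw [loop_eq_all, PySem.List.pyRange_one, List.all_map, List.all_eq_true]
  have hlen : (((l.length : Int)) - 0).toNat = l.length := by omega
  rw [hlen]
  constructor
  · intro hall k hk
    have := hall k (List.mem_range.mpr hk)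
    simp only [Function.comp_apply, zero_add] at this
    rw [show (mi : Int) + (k : Int) = ((mi + k : Nat) : Int) by push_cast; ring,
        PySem.Int.mod_natCast, PySem.List.pyGetD_natCast] at this
    exact beq_iff_eq.mp this
  · intro hp k hk
    simp only [Function.comp_apply, zero_add]
    rw [show (mi : Int) + (k : Int) = ((mi + k : Nat) : Int) by push_cast; ring,
        PySem.Int.mod_natCast, PySem.List.pyGetD_natCast]
    exact beq_iff_eq.mpr (hp k (List.mem_range.mp hk))

-- B returns True iff exactly n-1 cyclic differences equal 1
lemma B_char (l : List Int) (h : l ≠ []) :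
    round_dance_alt l = true ↔
      (List.range l.length).countP (fun j => decide (pvD l j = 1)) = l.length - 1 := by
  have hn : 0 < l.length := List.length_pos_iff.mpr h
  simp only [round_dance_alt, PySem.List.len, PySem.List.pyRange_one, pvD, pvF]
  rw [List.foldl_map]
  have hcongr : ∀ (c : Int), ∀ k ∈ List.range (((l.length : Int) - 0).toNat),
      (fun (c : Int) (k : Nat) => if PySem.List.pyGetD l (PySem.Int.mod ((0 + (k:Int)) + 1) l.length) 0 - PySem.List.pyGetD l (0 + (k:Int)) 0 = 1 then c + 1 else c) c k
      = (fun (c : Int) (k : Nat) => if (l.getD ((k + 1) % l.length) 0 - l.getD k 0) = 1 then c + 1 else c) c k := by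
    intro c k hk
    simp only [zero_add]
    have h1 : (k:Int) + 1 = ((k + 1 : Nat) : Int) := by push_cast; ring
    rw [h1, PySem.Int.mod_natCast]
    simp only [PySem.List.pyGetD_natCast]
  have heq := PySem.List.foldl_congr_mem _ _ _ (0:Int) hcongr
  simp only [zero_add] at heq ⊢
  rw [heq, PySem.List.foldl_ite_add_one]
  have hlen : (((l.length : Int)) - 0).toNat = l.length := by omega
  rw [hlen]
  simp only [zero_add, beq_iff_eq]
  have hn1 : 1 ≤ l.length := hn
  constructor
  · intro hc; zify [hn1]; exact hc
  · intro hc; zify [hn1] at hc; exact hc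

-- injectivity of the cyclic shift on [0, n)
lemma shift_inj {n s k1 k2 : Nat} (h1 : k1 < n) (h2 : k2 < n)
    (h : (s + k1) % n = (s + k2) % n) : k1 = k2 := by
  have := Nat.ModEq.add_left_cancel' s (h : (s + k1) ≡ (s + k2) [MOD n])
  rwa [Nat.ModEq, Nat.mod_eq_of_lt h1, Nat.mod_eq_of_lt h2] at this

-- surjectivity of the cyclic shift on [0, n)
lemma shift_surj {n s : Nat} (hs : s < n) (j : Nat) (hj : j < n) :
    ∃ i < n, (s + i) % n = j := by
  refine ⟨(n + j - s) % n, Nat.mod_lt _ (by omega), ?_⟩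
  rw [Nat.add_mod_mod]
  have : s + (n + j - s) = n + j := by omega
  rw [this, Nat.add_mod_left, Nat.mod_eq_of_lt hj]

-- under A's condition, the cyclic difference is 1 everywhere except at the wrap
lemma fwd_step (l : List Int) (m : Int) (mi : Nat) (hmi : mi < l.length)
    (hA : ∀ k < l.length, pvF l ((mi + k) % l.length) = m + k)
    (k : Nat) (hk : k < l.length) :
    (pvD l ((mi + k) % l.length) = 1) ↔ k + 1 ≠ l.length := by
  set n := l.length with hn
  have hn0 : 0 < n := by omega
  have hj1 : ((mi + k) % n + 1) % n = (mi + (k + 1)) % n := by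
    rw [Nat.mod_add_mod, ← Nat.add_assoc]
  unfold pvD
  rw [← hn, hj1, hA k hk]
  by_cases hkn : k + 1 = n
  · have h0 : (mi + (k + 1)) % n = mi := by
      rw [hkn, Nat.add_mod_right, Nat.mod_eq_of_lt hmi]
    have hm : pvF l mi = m := by
      have := hA 0 hn0
      rw [Nat.add_zero, Nat.mod_eq_of_lt hmi] at this
      rw [this]; push_cast; ring
    rw [h0, hm]
    constructor
    · intro h; exfalso; omega
    · intro h; exact absurd hkn h
  · have hk1 : k + 1 < n := by omega
    rw [hA (k + 1) hk1]
    constructor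
    · intro _; exact hkn
    · intro _; push_cast; ring

-- the shifted enumeration of [0, n) is a permutation of it
lemma perm_shift {n s : Nat} (hs : s < n) :
    (((List.range n).map (fun k => (s + k) % n)).Perm (List.range n)) := by
  have hnodup : ((List.range n).map (fun k => (s + k) % n)).Nodup := by
    refine List.Nodup.map_on ?_ (List.nodup_range)
    intro x hx y hy hxy
    exact shift_inj (List.mem_range.mp hx) (List.mem_range.mp hy) hxy
  have hsub : ((List.range n).map (fun k => (s + k) % n)) ⊆ List.range n := by
    intro x hx
    rcases List.mem_map.mp hx with ⟨k, _, rfl⟩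
    exact List.mem_range.mpr (Nat.mod_lt _ (by omega))
  exact (hnodup.subperm hsub).perm_of_length_le (by simp)

lemma count_ne_last (n : Nat) (hn : 0 < n) :
    (List.range n).countP (fun k => decide (k + 1 ≠ n)) = n - 1 := by
  obtain ⟨p, rfl⟩ : ∃ p, n = p + 1 := ⟨n - 1, by omega⟩
  rw [List.range_succ, List.countP_append, List.countP_cons, List.countP_nil]
  have h1 : (List.range p).countP (fun k => decide (k + 1 ≠ p + 1)) = p := by
    rw [List.countP_eq_length.mpr, List.length_range]
    intro a ha
    have := List.mem_range.mp ha
    simp only [decide_eq_true_eq]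
    omega
  rw [h1]
  simp

lemma forward (l : List Int) (m : Int) (mi : Nat) (h : l ≠ []) (hmi : mi < l.length)
    (hA : ∀ k < l.length, pvF l ((mi + k) % l.length) = m + k) :
    (List.range l.length).countP (fun j => decide (pvD l j = 1)) = l.length - 1 := by
  set n := l.length with hn
  have hn0 : 0 < n := List.length_pos_iff.mpr h
  have hperm := perm_shift (n := n) (s := mi) hmi
  rw [← hperm.countP_eq, List.countP_map]
  have hcg : ∀ k ∈ List.range n,
      ((fun j => decide (pvD l j = 1)) ∘ (fun k => (mi + k) % n)) k = (fun k => decide (k + 1 ≠ n)) k := by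
    intro k hk
    simp only [Function.comp_apply, decide_eq_decide]
    exact fwd_step l m mi hmi hA k (List.mem_range.mp hk)
  rw [List.countP_congr (by intro x hx; rw [hcg x hx])]
  exact count_ne_last n hn0

lemma backward (l : List Int) (m : Int) (mi : Nat) (h : l ≠ [])
    (hmem : m ∈ l) (hle : ∀ y ∈ l, m ≤ y)
    (hmi : mi < l.length) (hget : l.getD mi 0 = m)
    (hC : (List.range l.length).countP (fun j => decide (pvD l j = 1)) = l.length - 1) :
    ∀ k < l.length, pvF l ((mi + k) % l.length) = m + k := by
  set n := l.length with hn
  have hn0 : 0 < n := List.length_pos_iff.mpr h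
  -- exactly one cyclic position does not step up by 1
  have hq : (List.range n).countP (fun j => decide (pvD l j ≠ 1)) = 1 := by
    have htot := List.length_eq_countP_add_countP (l := List.range n) (fun j => decide (pvD l j = 1))
    rw [List.length_range, hC] at htot
    have hcg : (List.range n).countP (fun a => decide ¬((fun j => decide (pvD l j = 1)) a = true))
        = (List.range n).countP (fun j => decide (pvD l j ≠ 1)) := by
      apply List.countP_congr; intro x hx; simp
    rw [hcg] at htot
    omega
  rw [List.countP_eq_length_filter] at hq
  obtain ⟨j0, hfil⟩ := List.length_eq_one_iff.mp hq
  have hj0mem : j0 ∈ (List.range n).filter (fun j => decide (pvD l j ≠ 1)) := by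
    rw [hfil]; exact List.mem_singleton.mpr rfl
  have hj0n : j0 < n := List.mem_range.mp (List.mem_of_mem_filter hj0mem)
  have huniq : ∀ j, j < n → j ≠ j0 → pvD l j = 1 := by
    intro j hj hne
    by_contra hd
    have : j ∈ (List.range n).filter (fun j => decide (pvD l j ≠ 1)) :=
      List.mem_filter.mpr ⟨List.mem_range.mpr hj, by simpa using hd⟩
    rw [hfil] at this
    exact hne (List.mem_singleton.mp this)
  set s := (j0 + 1) % n with hsdef
  have hs : s < n := Nat.mod_lt _ (by omega)
  -- the run: values increase by one around the cycle starting at s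
  have hrun : ∀ i, i < n → pvF l ((s + i) % n) = pvF l s + i := by
    intro i
    induction i with
    | zero => intro _; rw [Nat.add_zero, Nat.mod_eq_of_lt hs]; push_cast; ring
    | succ i ih =>
      intro hin
      have hi : i < n := by omega
      have hjn : (s + i) % n < n := Nat.mod_lt _ (by omega)
      have hne : (s + i) % n ≠ j0 := by
        intro heq
        have h2 : (j0 + (1 + i)) % n = j0 % n := by
          rw [← Nat.add_assoc]
          rw [hsdef, Nat.mod_add_mod] at heq
          rw [heq, Nat.mod_eq_of_lt hj0n]
        have h3 : 1 + i ≡ 0 [MOD n] :=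
          Nat.ModEq.add_left_cancel' j0 (by rw [Nat.add_zero]; exact h2)
        have h4 : (1 + i) % n = 0 % n := h3
        rw [Nat.zero_mod, Nat.mod_eq_of_lt (by omega : 1 + i < n)] at h4
        omega
      have hd := huniq _ hjn hne
      unfold pvD at hd
      rw [← hn, Nat.mod_add_mod, Nat.add_assoc] at hd
      have := ih hi
      rw [this] at hd
      have : pvF l ((s + (i + 1)) % n) = pvF l s + i + 1 := by omega
      rw [this]; push_cast; ring
  -- each position carries the value pvF l s + its offset
  have hval : ∀ j, j < n → ∃ i, i < n ∧ (s + i) % n = j ∧ pvF l j = pvF l s + i := by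
    intro j hj
    obtain ⟨i, hin, hij⟩ := shift_surj hs j hj
    exact ⟨i, hin, hij, by rw [← hij]; exact hrun i hin⟩
  -- the minimum is the value at s
  have hsl : pvF l s ∈ l := by
    rw [pvF, List.getD_eq_getElem l 0 (hn ▸ hs)]
    exact List.getElem_mem _
  have hms : m = pvF l s := by
    obtain ⟨jm, hjm, hjget⟩ := List.mem_iff_getElem.mp hmem
    obtain ⟨i, hin, _, hvi⟩ := hval jm (hn ▸ hjm)
    have h1 : pvF l jm = m := by rw [pvF, List.getD_eq_getElem l 0 hjm, hjget]
    have h2 : m ≤ pvF l s := hle _ hsl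
    have h3 : (0:Int) ≤ i := Int.natCast_nonneg i
    omega
  -- the minimum occurs only at s, so the found index is s
  have hmis : mi = s := by
    obtain ⟨i, hin, hij, hvi⟩ := hval mi hmi
    have h1 : pvF l mi = m := hget
    have h2 : (i : Int) = 0 := by omega
    have h3 : i = 0 := by exact_mod_cast h2
    rw [h3, Nat.add_zero, Nat.mod_eq_of_lt hs] at hij
    omega
  intro k hk
  rw [hmis, hms]
  exact hrun k hk

-- ===== VERDICT (by name: the statement is the Claim_ definition above) =====
theorem round_dance_spec : Claim_equal_round_dance := by
  intro l _ hpre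
  unfold Spec_round_dance
  have h : l ≠ [] := hpre
  obtain ⟨m, hmin⟩ : ∃ m, PySem.List.min? l (fun x => x) = some m := by
    cases hcase : PySem.List.min? l (fun x => x) with
    | none => exact absurd ((PySem.List.min?_eq_none_iff _ _).mp hcase) h
    | some m => exact ⟨m, rfl⟩
  have hmem : m ∈ l := PySem.List.min?_mem hmin
  obtain ⟨mi, hidx⟩ : ∃ mi, PySem.List.index? l m = some mi := by
    cases hcase : PySem.List.index? l m with
    | none => exact absurd hmem ((PySem.List.index?_eq_none_iff _ _).mp hcase)
    | some mi => exact ⟨mi, rfl⟩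
  have hle : ∀ y ∈ l, m ≤ y := PySem.List.min?_isMin hmin
  obtain ⟨hmi, hgetE, _⟩ := PySem.List.getElem_of_index?_eq_some hidx
  have hget : l.getD mi 0 = m := by rw [List.getD_eq_getElem l 0 hmi, hgetE]
  apply Bool.coe_iff_coe.mp
  rw [A_char l m mi hmin hidx, B_char l h]
  constructor
  · exact forward l m mi h hmi
  · exact backward l m mi h hmem hle hmi hget
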